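-- pv_equiv track=rewrite | github.com/bobrenjc93/tlhub | src/tlhub/trace_parser.py | discover_event_type
-- ===== SOURCE A (Python) =====
-- from typing import Any, Iterator, TextIO
--
-- STANDARD_KEYS = {
--     "rank",
--     "compiled_autograd_id",
--     "frame_id",
--     "frame_compile_id",
--     "attempt",
--     "has_payload",
--     "stack",
-- }
--
-- def discover_event_type(envelope: dict[str, Any]) -> str:
--     interesting = [
--         key for key, value in envelope.items() if value is not None and key not in STANDARD_KEYS
--     ]
--     if not interesting:
--         if envelope.get("has_payload") is not None:
--             return "payload"
--         return "unknown"
--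
--     for key in (
--         "artifact",
--         "graph_dump",
--         "inductor_output_code",
--         "dump_file",
--         "dynamo_guards",
--         "memoizer_artifacts",
--         "compilation_metrics",
--         "bwd_compilation_metrics",
--         "aot_autograd_backward_compilation_metrics",
--         "link",
--         "symbolic_shape_specialization",
--         "guard_added_fast",
--         "guard_added",
--         "propagate_real_tensors_provenance",
--         "create_symbol",
--         "create_unbacked_symbol",
--         "expression_created",
--         "chromium_event",
--     ):
--         if key in interesting:
--             return key
--     return interesting[0]
-- ===== SOURCE B (Python) =====
-- STANDARD_KEYS = {
--     "rank",
--     "compiled_autograd_id",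
--     "frame_id",
--     "frame_compile_id",
--     "attempt",
--     "has_payload",
--     "stack",
-- }
--
-- PRIORITY = {
--     key: i
--     for i, key in enumerate(
--         (
--             "artifact",
--             "graph_dump",
--             "inductor_output_code",
--             "dump_file",
--             "dynamo_guards",
--             "memoizer_artifacts",
--             "compilation_metrics",
--             "bwd_compilation_metrics",
--             "aot_autograd_backward_compilation_metrics",
--             "link",
--             "symbolic_shape_specialization",
--             "guard_added_fast",
--             "guard_added",
--             "propagate_real_tensors_provenance",
--             "create_symbol",
--             "create_unbacked_symbol",
--             "expression_created",
--             "chromium_event",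
--         )
--     )
-- }
--
--
-- def discover_event_type(envelope: dict) -> str:
--     # One pass over the envelope: remember the first interesting key (fallback)
--     # and, among interesting keys known to PRIORITY, the one of smallest rank.
--     first = None
--     best_rank = None
--     best_key = None
--     for key, value in envelope.items():
--         if value is None or key in STANDARD_KEYS:
--             continue
--         if first is None:
--             first = key
--         rank = PRIORITY.get(key)
--         if rank is not None and (best_rank is None or rank < best_rank):
--             best_rank = rank
--             best_key = key
--     if first is None:
--         if envelope.get("has_payload") is not None:
--             return "payload"
--         return "unknown"
--     return best_key if best_key is not None else first
-- ===== Notes on version B (the rewrite author's own statement) =====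
-- stated objective: idiomatic
-- what changed: Replaces the two-phase scheme (build the interesting list, then scan the 18-key priority tuple doing list membership tests) by a single pass over the envelope that tracks the first interesting key and the minimum-rank key under a precomputed rank table.
import Mathlib
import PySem

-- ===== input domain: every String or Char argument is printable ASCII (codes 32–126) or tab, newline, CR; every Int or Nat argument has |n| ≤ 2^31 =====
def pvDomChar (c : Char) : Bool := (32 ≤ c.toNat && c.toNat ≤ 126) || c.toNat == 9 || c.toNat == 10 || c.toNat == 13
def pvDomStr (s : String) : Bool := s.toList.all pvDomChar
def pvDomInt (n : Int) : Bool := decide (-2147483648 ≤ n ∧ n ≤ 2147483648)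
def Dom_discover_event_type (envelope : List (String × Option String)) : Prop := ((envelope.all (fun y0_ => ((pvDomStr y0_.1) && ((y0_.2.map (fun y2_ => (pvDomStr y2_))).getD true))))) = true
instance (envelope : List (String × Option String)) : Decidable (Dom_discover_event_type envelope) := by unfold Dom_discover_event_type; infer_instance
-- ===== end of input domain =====

-- B is a one-pass re-implementation: instead of building the interesting list and then
-- scanning the 18-key priority tuple with membership tests, it walks the envelope once,
-- tracking the first interesting key and the interesting key of minimal priority rank.

def pvSTD : List String :=
  ["rank", "compiled_autograd_id", "frame_id", "frame_compile_id", "attempt",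
   "has_payload", "stack"]

def pvPRIO : List String :=
  ["artifact", "graph_dump", "inductor_output_code", "dump_file", "dynamo_guards",
   "memoizer_artifacts", "compilation_metrics", "bwd_compilation_metrics",
   "aot_autograd_backward_compilation_metrics", "link", "symbolic_shape_specialization",
   "guard_added_fast", "guard_added", "propagate_real_tensors_provenance",
   "create_symbol", "create_unbacked_symbol", "expression_created", "chromium_event"]

-- envelope.get(k): first-match association-list lookup (dict keys are unique in Python)
def pvGetEnv (envelope : List (String × Option String)) (k : String) : Option (Option String) :=
  (envelope.find? (fun kv => kv.1 == k)).map Prod.snd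

-- ===== PORT A =====
-- the 'for key in (...)' loop: first priority key contained in `interesting`
def pvFindPrio : List String → List String → Option String
  | [], _ => none
  | p :: ps, interesting => if interesting.contains p then some p else pvFindPrio ps interesting

def discover_event_type (envelope : List (String × Option String)) : String :=
  let interesting :=
    (envelope.filter (fun kv => kv.2.isSome && !(pvSTD.contains kv.1))).map Prod.fst
  match interesting with
  | [] =>
    match pvGetEnv envelope "has_payload" with
    | some (some _) => "payload"
    | _ => "unknown"
  | k0 :: _ =>
    match pvFindPrio pvPRIO interesting with
    | some key => key
    | none => k0

-- ===== PORT B =====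
-- B-side copies of the module-level constants (so the two ports share no definitions)
def pvSTD_B : List String :=
  ["rank", "compiled_autograd_id", "frame_id", "frame_compile_id", "attempt",
   "has_payload", "stack"]

def pvPRIO_B : List String :=
  ["artifact", "graph_dump", "inductor_output_code", "dump_file", "dynamo_guards",
   "memoizer_artifacts", "compilation_metrics", "bwd_compilation_metrics",
   "aot_autograd_backward_compilation_metrics", "link", "symbolic_shape_specialization",
   "guard_added_fast", "guard_added", "propagate_real_tensors_provenance",
   "create_symbol", "create_unbacked_symbol", "expression_created", "chromium_event"]

def pvGetEnvB (envelope : List (String × Option String)) (k : String) : Option (Option String) :=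
  (envelope.find? (fun kv => kv.1 == k)).map Prod.snd
def pvUpdFirst (first : Option String) (k : String) : Option String :=
  match first with
  | none => some k
  | some f => some f

def pvUpdBest (best : Option (Nat × String)) (k : String) : Option (Nat × String) :=
  match PySem.List.index? pvPRIO_B k with   -- PRIORITY.get(key)
  | none => best
  | some r =>
    match best with
    | none => some (r, k)
    | some (br, bk) => if r < br then some (r, k) else some (br, bk)

def pvBStep (st : Option String × Option (Nat × String)) (kv : String × Option String) :
    Option String × Option (Nat × String) :=
  if kv.2.isSome && !(pvSTD_B.contains kv.1) then (pvUpdFirst st.1 kv.1, pvUpdBest st.2 kv.1)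
  else st

def discover_event_type_alt (envelope : List (String × Option String)) : String :=
  let st := envelope.foldl pvBStep (none, none)
  match st.1, st.2 with
  | none, _ =>
    -- envelope.get("has_payload") is not None  (absent and value-None both give none)
    if ((pvGetEnvB envelope "has_payload").getD none).isSome then "payload" else "unknown"
  | some _, some (_, bk) => bk
  | some first, none => first

-- ===== PRECONDITION & SPEC =====
def Spec_discover_event_type (envelope : List (String × Option String)) (out : String) : Prop := out = discover_event_type_alt envelope
instance (envelope : List (String × Option String)) (out : String) : Decidable (Spec_discover_event_type envelope out) := by unfold Spec_discover_event_type; infer_instance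

-- ===== CLAIM (what is proved, stated in full; the proofs are below) =====
def Claim_equal_discover_event_type : Prop := ∀ (envelope : List (String × Option String)), Dom_discover_event_type envelope → Spec_discover_event_type envelope (discover_event_type envelope)

-- ===== LEMMAS AND PROOFS =====

-- the fold over the envelope is the pair of independent folds over the interesting keys
theorem pv_fold_pair (l : List (String × Option String))
    (a : Option String) (b : Option (Nat × String)) :
    l.foldl pvBStep (a, b) =
      (((l.filter (fun kv => kv.2.isSome && !(pvSTD_B.contains kv.1))).map Prod.fst).foldl pvUpdFirst a,
       ((l.filter (fun kv => kv.2.isSome && !(pvSTD_B.contains kv.1))).map Prod.fst).foldl pvUpdBest b) := by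
  induction l generalizing a b with
  | nil => rfl
  | cons kv l ih =>
    rw [List.foldl_cons, List.filter_cons]
    by_cases h : (kv.2.isSome && !(pvSTD_B.contains kv.1)) = true
    · rw [if_pos h]
      have hstep : pvBStep (a, b) kv = (pvUpdFirst a kv.1, pvUpdBest b kv.1) := by
        unfold pvBStep; rw [if_pos h]
      rw [hstep, ih]
      rfl
    · rw [if_neg h]
      have hstep : pvBStep (a, b) kv = (a, b) := by unfold pvBStep; rw [if_neg h]
      rw [hstep, ih]

theorem pv_first_some (I : List String) (f : String) :
    I.foldl pvUpdFirst (some f) = some f := by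
  induction I with
  | nil => rfl
  | cons k I ih => simpa [pvUpdFirst] using ih

theorem pv_first_head (I : List String) :
    I.foldl pvUpdFirst none = I.head? := by
  cases I with
  | nil => rfl
  | cons k I => simp [pvUpdFirst, pv_first_some]

-- invariant of the best-rank fold
def pvOk (S : List String) (b : Option (Nat × String)) : Prop :=
  match b with
  | none => ∀ k ∈ S, pvPRIO_B.idxOf? k = none
  | some (r, x) => pvPRIO_B.idxOf? x = some r ∧ x ∈ S ∧
      ∀ k ∈ S, ∀ r', pvPRIO_B.idxOf? k = some r' → r ≤ r'

theorem pv_ok_step (S : List String) (b : Option (Nat × String)) (k : String)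
    (hb : pvOk S b) : pvOk (S ++ [k]) (pvUpdBest b k) := by
  unfold pvUpdBest
  rw [PySem.List.index?_eq_idxOf?]
  cases hk : pvPRIO_B.idxOf? k with
  | none =>
    cases b with
    | none =>
      intro x hx
      rcases List.mem_append.1 hx with h | h
      · exact hb x h
      · simp at h; subst h; exact hk
    | some p =>
      obtain ⟨h1, h2, h3⟩ := hb
      refine ⟨h1, List.mem_append.2 (Or.inl h2), ?_⟩
      intro x hx r' hr'
      rcases List.mem_append.1 hx with h | h
      · exact h3 x h r' hr'
      · simp at h; subst h; simp [hk] at hr'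
  | some r =>
    cases b with
    | none =>
      refine ⟨hk, List.mem_append.2 (Or.inr (by simp)), ?_⟩
      intro x hx r' hr'
      rcases List.mem_append.1 hx with h | h
      · simp [hb x h] at hr'
      · simp at h; subst h; rw [hk] at hr'; injection hr' with h'; omega
    | some p =>
      obtain ⟨br, bk⟩ := p
      obtain ⟨h1, h2, h3⟩ := hb
      by_cases hlt : r < br
      · simp only [if_pos hlt]
        refine ⟨hk, List.mem_append.2 (Or.inr (by simp)), ?_⟩
        intro x hx r' hr'
        rcases List.mem_append.1 hx with h | h
        · have := h3 x h r' hr'; omega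
        · simp at h; subst h; rw [hk] at hr'; injection hr' with h'; omega
      · simp only [if_neg hlt]
        refine ⟨h1, List.mem_append.2 (Or.inl h2), ?_⟩
        intro x hx r' hr'
        rcases List.mem_append.1 hx with h | h
        · exact h3 x h r' hr'
        · simp at h; subst h; rw [hk] at hr'; injection hr' with h'; omega

theorem pv_ok_fold (I : List String) : ∀ (S : List String) (b : Option (Nat × String)),
    pvOk S b → pvOk (S ++ I) (I.foldl pvUpdBest b) := by
  induction I with
  | nil => intro S b h; simpa using h
  | cons k I ih =>
    intro S b h
    have h' := pv_ok_step S b k h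
    have := ih (S ++ [k]) (pvUpdBest b k) h'
    simpa [List.append_assoc] using this

theorem pv_ok_best (I : List String) : pvOk I (I.foldl pvUpdBest none) := by
  have h0 : pvOk [] (none : Option (Nat × String)) := by intro k hk; simp at hk
  simpa using pv_ok_fold I [] none h0

-- pvFindPrio finds nothing when no priority key is interesting
theorem pv_findPrio_none (ps I : List String) (h : ∀ p ∈ ps, p ∉ I) :
    pvFindPrio ps I = none := by
  induction ps with
  | nil => rfl
  | cons p ps ih =>
    have hp : p ∉ I := h p (by simp)
    simp only [pvFindPrio]
    rw [if_neg (by simpa using hp)]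
    exact ih (fun q hq => h q (by simp [hq]))

-- pvFindPrio returns the interesting key of minimal rank
theorem pv_findPrio_min (ps : List String) : ∀ (I : List String) (x : String) (s : Nat),
    x ∈ I → ps.idxOf? x = some s →
    (∀ k ∈ I, ∀ s', ps.idxOf? k = some s' → s ≤ s') →
    pvFindPrio ps I = some x := by
  induction ps with
  | nil => intro I x s _ hidx _; simp at hidx
  | cons q qs ih =>
    intro I x s hxI hidx hmin
    by_cases hq : q ∈ I
    · have hcq : I.contains q = true := by simpa using hq
      simp only [pvFindPrio]
      rw [if_pos hcq]
      have hq0 : (q :: qs).idxOf? q = some 0 := by simp [List.idxOf?_cons]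
      have hs0 : s ≤ 0 := hmin q hq 0 hq0
      have hs : s = 0 := Nat.le_zero.1 hs0
      subst hs
      -- idxOf? x = some 0 on q :: qs forces x = q
      by_cases hqx : q = x
      · rw [hqx]
      · rw [List.idxOf?_cons] at hidx
        rw [if_neg (by simpa using hqx)] at hidx
        simp at hidx
    · have hcq : ¬ I.contains q = true := by simpa using hq
      simp only [pvFindPrio]
      rw [if_neg hcq]
      have hqx : q ≠ x := fun h => hq (h ▸ hxI)
      rw [List.idxOf?_cons] at hidx
      rw [if_neg (by simpa using hqx)] at hidx
      obtain ⟨t, ht, hts⟩ := Option.map_eq_some_iff.1 hidx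
      refine ih I x t hxI ht ?_
      intro k hk s' hs'
      have hqk : q ≠ k := fun h => hq (h ▸ hk)
      have : (q :: qs).idxOf? k = some (s' + 1) := by
        rw [List.idxOf?_cons, if_neg (by simpa using hqk), hs']; rfl
      have := hmin k hk (s' + 1) this
      omega

-- ===== VERDICT (by name: the statement is the Claim_ definition above) =====
theorem discover_event_type_spec : Claim_equal_discover_event_type := by
  intro envelope _
  unfold Spec_discover_event_type discover_event_type discover_event_type_alt
  have hstd : (fun kv : String × Option String => kv.2.isSome && !(pvSTD.contains kv.1))
      = (fun kv : String × Option String => kv.2.isSome && !(pvSTD_B.contains kv.1)) := rfl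
  have hprio : pvPRIO = pvPRIO_B := rfl
  rw [hstd, hprio, pv_fold_pair]
  generalize ((envelope.filter (fun kv => kv.2.isSome && !(pvSTD_B.contains kv.1))).map Prod.fst) = I
  simp only [pv_first_head]
  have hok := pv_ok_best I
  cases I with
  | nil =>
    show (match pvGetEnv envelope "has_payload" with
          | some (some _) => "payload"
          | _ => "unknown")
        = if ((pvGetEnvB envelope "has_payload").getD none).isSome then "payload" else "unknown"
    rw [show pvGetEnvB = pvGetEnv from rfl]
    cases hp : pvGetEnv envelope "has_payload" with
    | none => rfl
    | some v => cases v <;> rfl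
  | cons k0 I' =>
    simp only [List.head?_cons]
    cases hb : (k0 :: I').foldl pvUpdBest none with
    | none =>
      rw [hb] at hok
      have : pvFindPrio pvPRIO_B (k0 :: I') = none := by
        refine pv_findPrio_none _ _ ?_
        intro p hp hpI
        have := hok p hpI
        rw [List.idxOf?_eq_none_iff] at this
        exact this hp
      rw [this]
    | some p =>
      obtain ⟨r, x⟩ := p
      rw [hb] at hok
      obtain ⟨h1, h2, h3⟩ := hok
      rw [pv_findPrio_min pvPRIO_B (k0 :: I') x r h2 h1 h3]
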